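-- pv_equiv track=rewrite | github.com/faccroot/pg_transformer_research | tools/build_pr_lever_tracker.py | choose_primary_value
-- ===== SOURCE A (Python) =====
-- def choose_primary_value(values: list[str], baseline: str | None) -> str | None:
--     if not values:
--         return None
--     non_baseline = [value for value in values if baseline is None or value != baseline]
--     if len(non_baseline) == 1:
--         return non_baseline[0]
--     if non_baseline:
--         return non_baseline[-1]
--     return values[-1]
-- ===== SOURCE B (Python) =====
-- def choose_primary_value(values: list[str], baseline: str | None) -> str | None:
--     if not values:
--         return None
--     for value in reversed(values):
--         if baseline is None or value != baseline:
--             return value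
--     return values[-1]
-- ===== Notes on version B (the rewrite author's own statement) =====
-- stated objective: simpler
-- what changed: Replaces building a filtered list plus length/emptiness branching with a single reverse scan that returns the first (i.e. last) non-baseline value, falling back to values[-1].
import Mathlib
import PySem

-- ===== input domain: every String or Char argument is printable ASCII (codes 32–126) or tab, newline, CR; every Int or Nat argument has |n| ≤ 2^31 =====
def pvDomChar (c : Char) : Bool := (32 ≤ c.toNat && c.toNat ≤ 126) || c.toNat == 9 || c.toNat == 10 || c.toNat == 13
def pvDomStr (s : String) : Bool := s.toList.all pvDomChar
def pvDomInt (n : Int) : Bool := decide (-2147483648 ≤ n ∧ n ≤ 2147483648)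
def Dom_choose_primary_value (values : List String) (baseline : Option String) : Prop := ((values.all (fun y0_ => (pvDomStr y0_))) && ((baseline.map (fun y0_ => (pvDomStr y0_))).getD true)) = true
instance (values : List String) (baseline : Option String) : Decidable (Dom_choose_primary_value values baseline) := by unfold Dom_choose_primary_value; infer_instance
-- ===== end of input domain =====

-- B replaces A's filtered intermediate list and length/emptiness branching by a single
-- reverse scan with early exit (simpler; same O(n) cost).


-- ===== PORT A =====
-- 'baseline is None or value != baseline'
def pvKeep (baseline : Option String) (value : String) : Bool :=
  match baseline with
  | none => true
  | some b => value != b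

def choose_primary_value (values : List String) (baseline : Option String) : Option String :=
  if values = [] then none
  else
    let non_baseline := values.filter (pvKeep baseline)
    if non_baseline.length = 1 then PySem.List.pyGet? non_baseline 0
    else if non_baseline ≠ [] then PySem.List.pyGet? non_baseline (-1)
    else PySem.List.pyGet? values (-1)

-- ===== PORT B =====
-- the 'for value in reversed(values)' loop; dflt is the value of the fall-through 'return values[-1]'
def pvRevScan (baseline : Option String) (dflt : Option String) : List String → Option String
  | [] => dflt
  | value :: rest =>
      if pvKeep baseline value then some value else pvRevScan baseline dflt rest

def choose_primary_value_alt (values : List String) (baseline : Option String) : Option String :=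
  if values = [] then none
  else pvRevScan baseline (PySem.List.pyGet? values (-1)) values.reverse

-- ===== PRECONDITION & SPEC =====
def Spec_choose_primary_value (values : List String) (baseline : Option String) (out : Option String) : Prop := out = choose_primary_value_alt values baseline
instance (values : List String) (baseline : Option String) (out : Option String) : Decidable (Spec_choose_primary_value values baseline out) := by unfold Spec_choose_primary_value; infer_instance

-- ===== CLAIM (what is proved, stated in full; the proofs are below) =====
def Claim_equal_choose_primary_value : Prop := ∀ (values : List String) (baseline : Option String), Dom_choose_primary_value values baseline → Spec_choose_primary_value values baseline (choose_primary_value values baseline)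

-- ===== LEMMAS AND PROOFS =====

theorem pvRevScan_append (baseline : Option String) (d : Option String) (r₁ r₂ : List String) :
    pvRevScan baseline d (r₁ ++ r₂) = pvRevScan baseline (pvRevScan baseline d r₂) r₁ := by
  induction r₁ with
  | nil => rfl
  | cons x t ih => simp [pvRevScan, ih]

theorem pvRevScan_reverse (baseline : Option String) (d : Option String) (l : List String) :
    pvRevScan baseline d l.reverse = ((l.filter (pvKeep baseline)).getLast?).or d := by
  induction l generalizing d with
  | nil => rfl
  | cons x t ih =>
      rw [List.reverse_cons, pvRevScan_append]
      by_cases h : pvKeep baseline x = true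
      · simp [pvRevScan, h, ih, List.getLast?_cons, Option.or_assoc]
      · simp [pvRevScan, h, ih]

-- ===== VERDICT (by name: the statement is the Claim_ definition above) =====

theorem choose_primary_value_spec : Claim_equal_choose_primary_value := by
  intro values baseline _
  unfold Spec_choose_primary_value choose_primary_value choose_primary_value_alt
  by_cases hv : values = []
  · simp [hv]
  · simp only [hv, if_false, pvRevScan_reverse]
    set nb := values.filter (pvKeep baseline) with hnb
    rcases hlast : nb.getLast? with _ | x
    · have hnil : nb = [] := List.getLast?_eq_none_iff.mp hlast
      simp [hnil]
    · have hne : nb ≠ [] := by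
        intro h; rw [h] at hlast; simp at hlast
      by_cases h1 : nb.length = 1
      · obtain ⟨y, hy⟩ := List.length_eq_one_iff.mp h1
        rw [hy] at hlast
        simp at hlast
        simp [hy, hlast, PySem.List.pyGet?, PySem.List.pyIdx?]
      · simp [h1, hne, PySem.List.pyGet?_neg_one, hlast]
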